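-- pv_equiv track=rewrite | github.com/Filipchi/MisionTIC2022 | Ciclo l/Semana 3/miniReto3.py | costo_anuncio
-- ===== SOURCE A (Python) =====
-- def costo_anuncio (mensajes:list)->dict:
--     letrasEconomicas = ["f","i","j","k","l","t","r"]
--     precio = 0
--     resultado = {}
--     for i in mensajes:
--         for j in i:
--             if j in letrasEconomicas:
--                 precio = precio + 50
--             else:
--                 precio = precio + 100
--         resultado[i] = precio
--         precio = 0
--     return resultado
-- ===== SOURCE B (Python) =====
-- def costo_anuncio(mensajes: list) -> dict:
--     # Iterate over the 7-letter economic alphabet, not over the message's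
--     # characters: total economic occurrences via str.count per letter, then
--     # the closed-form price 100*len(m) - 50*economicas.
--     resultado = {}
--     for m in mensajes:
--         economicas = sum(m.count(c) for c in "fijklrt")
--         resultado[m] = 100 * len(m) - 50 * economicas
--     return resultado
-- ===== Notes on version B (the rewrite author's own statement) =====
-- stated objective: alternative
-- what changed: Instead of A's per-character 50/100 branching accumulator over each message, B traverses the fixed 7-letter economic alphabet, summing m.count(c) per letter, and prices by the closed form 100*len(m) - 50*economicas.
import Mathlib
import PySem

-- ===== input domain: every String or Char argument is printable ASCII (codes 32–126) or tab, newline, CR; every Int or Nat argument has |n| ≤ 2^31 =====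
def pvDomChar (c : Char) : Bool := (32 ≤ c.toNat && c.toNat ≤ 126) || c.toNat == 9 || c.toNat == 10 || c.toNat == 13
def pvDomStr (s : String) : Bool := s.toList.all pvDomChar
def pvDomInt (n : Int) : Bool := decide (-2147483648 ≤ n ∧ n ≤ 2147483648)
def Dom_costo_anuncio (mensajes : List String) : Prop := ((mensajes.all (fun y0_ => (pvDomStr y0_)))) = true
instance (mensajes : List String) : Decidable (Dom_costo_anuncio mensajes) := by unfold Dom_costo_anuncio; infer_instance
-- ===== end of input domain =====

-- B prices each message by traversing the economic ALPHABET (7 str.count passes) and the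
-- closed form 100*len - 50*economicas, instead of A's per-character 50/100 branching fold.
-- ===== PORT A =====
def costo_anuncio (mensajes : List String) : List (String × Int) :=
  let letrasEconomicas : List Char := ['f','i','j','k','l','t','r']
  (mensajes.foldl
    (fun (st : Int × PySem.Dict String Int) i =>
      let precio := i.toList.foldl
        (fun precio j => if j ∈ letrasEconomicas then precio + 50 else precio + 100) st.1
      ((0 : Int), st.2.insert i precio))
    ((0 : Int), (PySem.Dict.empty : PySem.Dict String Int))).2.items

-- ===== PORT B =====
-- m.count(c) for a single character c is exactly the count of c among m's characters.
def costo_anuncio_alt (mensajes : List String) : List (String × Int) :=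
  (mensajes.foldl
    (fun (d : PySem.Dict String Int) m =>
      let economicas : Int :=
        ((("fijklrt" : String).toList).map (fun c => (m.toList.count c : Int))).sum
      d.insert m (100 * (m.toList.length : Int) - 50 * economicas))
    (PySem.Dict.empty : PySem.Dict String Int)).items

-- ===== PRECONDITION & SPEC =====
def Spec_costo_anuncio (mensajes : List String) (out : List (String × Int)) : Prop := out = costo_anuncio_alt mensajes
instance (mensajes : List String) (out : List (String × Int)) : Decidable (Spec_costo_anuncio mensajes out) := by unfold Spec_costo_anuncio; infer_instance

-- ===== CLAIM =====
def Claim_equal_costo_anuncio : Prop := ∀ (mensajes : List String), Dom_costo_anuncio mensajes → Spec_costo_anuncio mensajes (costo_anuncio mensajes)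

-- ===== LEMMAS AND PROOFS =====

-- Indicator sum over a duplicate-free alphabet.
theorem ind_sum (L : List Char) (hnd : L.Nodup) (x : Char) :
    (L.map (fun c => if x = c then (1 : Int) else 0)).sum = if x ∈ L then 1 else 0 := by
  induction L with
  | nil => simp
  | cons a L ih =>
    rcases List.nodup_cons.mp hnd with ⟨ha, hL⟩
    simp only [List.map_cons, List.sum_cons, ih hL, List.mem_cons]
    by_cases hx : x = a
    · subst hx
      simp [ha]
    · simp [hx]

-- Summing per-letter counts over a duplicate-free alphabet counts membership.
theorem sum_counts (L : List Char) (hnd : L.Nodup) (l : List Char) :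
    (L.map (fun c => (l.count c : Int))).sum = (l.countP (fun c => decide (c ∈ L)) : Int) := by
  induction l with
  | nil => simp
  | cons x l ih =>
    have hstep : (L.map (fun c => ((x :: l).count c : Int))).sum
        = (L.map (fun c => (l.count c : Int))).sum
          + (L.map (fun c => if x = c then (1 : Int) else 0)).sum := by
      rw [← List.sum_map_add]
      refine congrArg List.sum (List.map_congr_left ?_)
      intro c _
      by_cases h : x = c
      · subst h; simp [List.count_cons]
      · have h' : ¬ (c = x) := fun hcx => h hcx.symm
        simp [List.count_cons, h', h]
    rw [hstep, ih, ind_sum L hnd x, List.countP_cons]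
    by_cases hx : x ∈ L
    · simp [hx]
    · simp [hx]

-- A's inner branching fold equals the closed form over B's alphabet sum.
theorem inner_price (l : List Char) (p : Int) :
    l.foldl (fun precio j => if j ∈ (['f','i','j','k','l','t','r'] : List Char) then precio + 50 else precio + 100) p
      = p + (100 * (l.length : Int)
          - 50 * ((("fijklrt" : String).toList).map (fun c => (l.count c : Int))).sum) := by
  have hL : ("fijklrt" : String).toList = ['f','i','j','k','l','r','t'] := by decide
  have hnd : (['f','i','j','k','l','r','t'] : List Char).Nodup := by decide
  rw [hL, sum_counts _ hnd l]
  induction l generalizing p with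
  | nil => simp
  | cons c l ih =>
    simp only [List.foldl_cons, List.length_cons, List.countP_cons, ih]
    by_cases h : c ∈ (['f','i','j','k','l','t','r'] : List Char)
    · have h' : (decide (c ∈ (['f','i','j','k','l','r','t'] : List Char))) = true := by
        simp only [List.mem_cons, List.not_mem_nil, or_false] at h ⊢
        simp only [decide_eq_true_iff]; tauto
      simp only [if_pos h, h']
      push_cast; ring
    · have h' : (decide (c ∈ (['f','i','j','k','l','r','t'] : List Char))) = false := by
        simp only [List.mem_cons, List.not_mem_nil, or_false] at h ⊢
        simp only [decide_eq_false_iff_not]; tauto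
      simp only [if_neg h, h']
      push_cast; ring

theorem fold_agree (mensajes : List String) (d : PySem.Dict String Int) :
    (mensajes.foldl
      (fun (st : Int × PySem.Dict String Int) i =>
        let precio := i.toList.foldl
          (fun precio j => if j ∈ (['f','i','j','k','l','t','r'] : List Char) then precio + 50 else precio + 100) st.1
        ((0 : Int), st.2.insert i precio))
      ((0 : Int), d)).2
    = mensajes.foldl
        (fun (d : PySem.Dict String Int) m =>
          d.insert m (100 * (m.toList.length : Int)
            - 50 * ((("fijklrt" : String).toList).map (fun c => (m.toList.count c : Int))).sum))
        d := by
  induction mensajes generalizing d with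
  | nil => rfl
  | cons m rest ih =>
    simp only [List.foldl_cons]
    rw [inner_price]
    simp only [zero_add]
    exact ih _

-- ===== VERDICT =====
theorem costo_anuncio_spec : Claim_equal_costo_anuncio := by
  intro mensajes _
  unfold Spec_costo_anuncio costo_anuncio costo_anuncio_alt
  exact congrArg PySem.Dict.items (fold_agree mensajes PySem.Dict.empty)
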